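-- pv_equiv track=rewrite | github.com/paolomartini25/ITIS_Sistemi_e_Reti | Esercizi/piastrella.py | numero_piatrelle_libere
-- ===== SOURCE A (Python) =====
-- OSTACOLO = -1
--
-- def numero_piatrelle_libere(p):
--     pavimento_numerato = []
--     cont = -1
--     for riga in p:
--         lista = []
--         for piastrella in riga:
--             if piastrella  == 0:
--                 cont += 1
--                 lista.append(cont)
--             else :
--                 lista.append(OSTACOLO)
--
--         pavimento_numerato.append(lista)
--     return pavimento_numerato
-- ===== SOURCE B (Python) =====
-- OSTACOLO = -1
--
-- def numero_piatrelle_libere(p):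
--     # Closed-form numbering: a free cell's number is the count of free cells
--     # strictly before it in reading order, computed per cell from prefix counts.
--     def zeros_before(row, j):
--         return sum(1 for x in row[:j] if x == 0)
--
--     def base(i):
--         return sum(1 for r in p[:i] for x in r if x == 0)
--
--     return [[base(i) + zeros_before(p[i], j) if p[i][j] == 0 else OSTACOLO
--              for j in range(len(p[i]))]
--             for i in range(len(p))]
-- ===== Notes on version B (the rewrite author's own statement) =====
-- stated objective: alternative
-- what changed: Replaces the single pass with a mutable running counter by a closed-form rendering: each free cell is numbered as the count of free cells strictly before it (per-row base + in-row prefix count), computed independently per cell.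
import Mathlib
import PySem

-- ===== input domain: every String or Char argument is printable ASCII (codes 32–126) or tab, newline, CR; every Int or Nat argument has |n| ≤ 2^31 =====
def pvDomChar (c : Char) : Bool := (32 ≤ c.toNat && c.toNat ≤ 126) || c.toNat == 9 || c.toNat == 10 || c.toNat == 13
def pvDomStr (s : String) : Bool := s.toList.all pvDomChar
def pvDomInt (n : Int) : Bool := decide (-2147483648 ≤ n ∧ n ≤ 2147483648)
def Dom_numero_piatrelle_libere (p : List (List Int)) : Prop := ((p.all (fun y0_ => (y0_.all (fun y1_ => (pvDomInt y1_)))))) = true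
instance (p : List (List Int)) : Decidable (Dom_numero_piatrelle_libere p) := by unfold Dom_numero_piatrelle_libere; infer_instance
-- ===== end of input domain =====

-- B replaces A's running counter by a closed-form per-cell prefix count (alternative decomposition; not faster).

-- ===== PORT A =====
-- literal port: outer fold carries (pavimento_numerato, cont), inner fold carries (lista, cont)
def numero_piatrelle_libere (p : List (List Int)) : List (List Int) :=
  (p.foldl
    (fun (st : List (List Int) × Int) riga =>
      let inner :=
        riga.foldl
          (fun (s : List Int × Int) piastrella =>
            if piastrella = 0 then (s.1 ++ [s.2 + 1], s.2 + 1) else (s.1 ++ [-1], s.2))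
          ([], st.2)
      (st.1 ++ [inner.1], inner.2))
    ([], -1)).1

-- ===== PORT B =====
-- sum(1 for x in row[:j] if x == 0); j comes from range(len(row)) so take j = row[:j] exactly
def pvZerosBefore (row : List Int) (j : Nat) : Int :=
  (row.take j).foldl (fun a x => if x = 0 then a + 1 else a) 0

-- sum(1 for r in p[:i] for x in r if x == 0); i comes from range(len(p)) so take i = p[:i] exactly
def pvBase (p : List (List Int)) (i : Nat) : Int :=
  (p.take i).foldl (fun a r => r.foldl (fun a x => if x = 0 then a + 1 else a) a) 0

-- indices from range(len(..)) are in bounds, so getD is exact for p[i] and p[i][j]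
def numero_piatrelle_libere_alt (p : List (List Int)) : List (List Int) :=
  (List.range p.length).map (fun i =>
    (List.range (p.getD i []).length).map (fun j =>
      if (p.getD i []).getD j 0 = 0 then pvBase p i + pvZerosBefore (p.getD i []) j else -1))

-- ===== PRECONDITION & SPEC =====
def Spec_numero_piatrelle_libere (p : List (List Int)) (out : List (List Int)) : Prop := out = numero_piatrelle_libere_alt p
instance (p : List (List Int)) (out : List (List Int)) : Decidable (Spec_numero_piatrelle_libere p out) := by unfold Spec_numero_piatrelle_libere; infer_instance

-- ===== CLAIM (what is proved, stated in full; the proofs are below) =====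
def Claim_equal_numero_piatrelle_libere : Prop := ∀ (p : List (List Int)), Dom_numero_piatrelle_libere p → Spec_numero_piatrelle_libere p (numero_piatrelle_libere p)

-- ===== LEMMAS AND PROOFS =====

-- count of zeros in a row / in a list of rows
def pvCz (l : List Int) : Int := l.foldl (fun a x => if x = 0 then a + 1 else a) 0
def pvCzAll (q : List (List Int)) : Int := q.foldl (fun a r => r.foldl (fun a x => if x = 0 then a + 1 else a) a) 0

-- what B computes for one row, given the number of zeros before the row
def pvRow (b : Int) (row : List Int) : List Int :=
  (List.range row.length).map (fun j => if row.getD j 0 = 0 then b + pvZerosBefore row j else -1)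

-- recursive description of the whole output
def pvOut (b : Int) : List (List Int) → List (List Int)
  | [] => []
  | r :: rs => pvRow b r :: pvOut (b + pvCz r) rs

theorem pvCz_shift (l : List Int) (a : Int) :
    l.foldl (fun a x => if x = 0 then a + 1 else a) a = a + pvCz l := by
  induction l generalizing a with
  | nil => simp [pvCz]
  | cons x xs ih =>
    simp only [pvCz, List.foldl_cons]
    rw [ih, ih (if x = 0 then 0 + 1 else 0)]
    split_ifs <;> ring

theorem pvCzAll_shift (q : List (List Int)) (a : Int) :
    q.foldl (fun a r => r.foldl (fun a x => if x = 0 then a + 1 else a) a) a = a + pvCzAll q := by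
  induction q generalizing a with
  | nil => simp [pvCzAll]
  | cons r rs ih =>
    simp only [pvCzAll, List.foldl_cons]
    rw [ih, pvCz_shift, ih (List.foldl _ 0 r), pvCz_shift]
    ring

theorem pvCzAll_cons (r : List Int) (rs : List (List Int)) :
    pvCzAll (r :: rs) = pvCz r + pvCzAll rs := by
  simp only [pvCzAll, List.foldl_cons]
  rw [pvCzAll_shift, pvCz_shift]
  simp [pvCz, pvCzAll]

theorem pvCz_cons (x : Int) (xs : List Int) :
    pvCz (x :: xs) = (if x = 0 then 1 else 0) + pvCz xs := by
  simp only [pvCz, List.foldl_cons]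
  rw [pvCz_shift]
  split_ifs <;> simp [pvCz]

theorem pvZerosBefore_cons (x : Int) (xs : List Int) (j : Nat) :
    pvZerosBefore (x :: xs) (j + 1) = (if x = 0 then 1 else 0) + pvZerosBefore xs j := by
  simp only [pvZerosBefore, List.take_succ_cons, List.foldl_cons]
  rw [pvCz_shift]
  split_ifs <;> simp [pvCz]

theorem pvRow_cons (b : Int) (x : Int) (xs : List Int) :
    pvRow b (x :: xs) = (if x = 0 then b else -1) :: pvRow (if x = 0 then b + 1 else b) xs := by
  simp only [pvRow, List.length_cons, List.range_succ_eq_map, List.map_cons, List.map_map]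
  congr 1
  · simp [pvZerosBefore]
  · apply List.map_congr_left
    intro j _
    simp only [Function.comp_apply, List.getD_cons_succ, pvZerosBefore_cons]
    split_ifs <;> ring_nf

theorem inner_spec (row : List Int) (acc : List Int) (c : Int) :
    row.foldl
      (fun (s : List Int × Int) piastrella =>
        if piastrella = 0 then (s.1 ++ [s.2 + 1], s.2 + 1) else (s.1 ++ [-1], s.2))
      (acc, c)
    = (acc ++ pvRow (c + 1) row, c + pvCz row) := by
  induction row generalizing acc c with
  | nil => simp [pvRow, pvCz]
  | cons x xs ih =>
    simp only [List.foldl_cons]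
    rw [pvRow_cons, pvCz_cons]
    by_cases hx : x = 0
    · simp only [hx, reduceIte]
      rw [ih]
      simp only [Prod.mk.injEq]
      exact ⟨by simp, by ring⟩
    · simp only [hx, reduceIte]
      rw [ih]
      simp only [Prod.mk.injEq]
      exact ⟨by simp, by ring⟩

theorem outer_spec (p : List (List Int)) (acc : List (List Int)) (c : Int) :
    p.foldl
      (fun (st : List (List Int) × Int) riga =>
        let inner :=
          riga.foldl
            (fun (s : List Int × Int) piastrella =>
              if piastrella = 0 then (s.1 ++ [s.2 + 1], s.2 + 1) else (s.1 ++ [-1], s.2))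
            ([], st.2)
        (st.1 ++ [inner.1], inner.2))
      (acc, c)
    = (acc ++ pvOut (c + 1) p, c + pvCzAll p) := by
  induction p generalizing acc c with
  | nil => simp [pvOut, pvCzAll]
  | cons r rs ih =>
    simp only [List.foldl_cons, inner_spec, List.nil_append] at ih ⊢
    rw [ih, pvCzAll_cons, pvOut]
    simp only [Prod.mk.injEq]
    constructor
    · simp only [List.append_assoc, List.singleton_append]
      congr 2
      ring_nf
    · ring

theorem a_eq_pvOut (p : List (List Int)) : numero_piatrelle_libere p = pvOut 0 p := by
  unfold numero_piatrelle_libere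
  rw [outer_spec]
  norm_num

theorem length_pvOut (b : Int) (p : List (List Int)) : (pvOut b p).length = p.length := by
  induction p generalizing b with
  | nil => simp [pvOut]
  | cons r rs ih => simp [pvOut, ih]

theorem pvOut_getElem? (p : List (List Int)) (b : Int) (i : Nat) (h : i < p.length) :
    (pvOut b p)[i]? = some (pvRow (b + pvCzAll (p.take i)) p[i]) := by
  induction p generalizing b i with
  | nil => simp at h
  | cons r rs ih =>
    cases i with
    | zero => simp [pvOut, pvCzAll]
    | succ i =>
      simp only [pvOut, List.getElem?_cons_succ, List.getElem_cons_succ, List.take_succ_cons]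
      rw [ih _ _ (by simpa using h), pvCzAll_cons]
      ring_nf

theorem length_alt (p : List (List Int)) :
    (numero_piatrelle_libere_alt p).length = p.length := by
  simp [numero_piatrelle_libere_alt]

theorem alt_eq_pvOut (p : List (List Int)) : numero_piatrelle_libere_alt p = pvOut 0 p := by
  apply List.ext_getElem?
  intro i
  by_cases h : i < p.length
  · rw [pvOut_getElem? p 0 i h]
    unfold numero_piatrelle_libere_alt
    rw [List.getElem?_map, List.getElem?_range h]
    simp only [Option.map_some]
    congr 1
    have hp : p.getD i [] = p[i] := List.getD_eq_getElem p [] h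
    simp only [pvRow, pvBase, hp, zero_add, pvCzAll]
  · rw [List.getElem?_eq_none (by rw [length_alt]; omega),
        List.getElem?_eq_none (by rw [length_pvOut]; omega)]

-- ===== VERDICT (by name: the statement is the Claim_ definition above) =====
theorem numero_piatrelle_libere_spec : Claim_equal_numero_piatrelle_libere := by
  intro p _
  unfold Spec_numero_piatrelle_libere
  rw [a_eq_pvOut, alt_eq_pvOut]
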